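-- pv_equiv track=rewrite | github.com/cakama3a/StickAnalyzer | StickAnalyzer.py | filter_noise
-- ===== SOURCE A (Python) =====
-- def filter_noise(results):
--     if not results:
--         return []
--
--     filtered_results = [results[0]]
--     for i in range(1, len(results)):
--         current_value = results[i]
--         previous_values = results[:i]
--         if current_value not in filtered_results and all(prev <= current_value for prev in previous_values):
--             filtered_results.append(current_value)
--
--     return filtered_results
-- ===== SOURCE B (Python) =====
-- def filter_noise(results):
--     if not results:
--         return []
--     out = [results[0]]
--     m = results[0]
--     for x in results[1:]:
--         if x > m:
--             out.append(x)
--             m = x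
--     return out
-- ===== Notes on version B (the rewrite author's own statement) =====
-- stated objective: faster
-- what changed: Replaced A's per-step membership test in the output list and full rescan of results[:i] by a single pass that keeps a running maximum and appends exactly the elements strictly exceeding it.
import Mathlib
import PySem

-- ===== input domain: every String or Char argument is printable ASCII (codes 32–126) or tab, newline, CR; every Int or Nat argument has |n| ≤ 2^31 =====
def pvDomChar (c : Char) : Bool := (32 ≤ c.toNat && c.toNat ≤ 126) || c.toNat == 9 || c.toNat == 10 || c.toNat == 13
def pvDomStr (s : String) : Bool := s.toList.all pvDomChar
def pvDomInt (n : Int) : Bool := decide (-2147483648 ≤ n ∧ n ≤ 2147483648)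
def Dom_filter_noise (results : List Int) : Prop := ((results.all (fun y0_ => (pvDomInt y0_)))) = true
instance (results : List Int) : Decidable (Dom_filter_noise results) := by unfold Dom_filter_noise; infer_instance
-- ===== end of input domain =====

-- B replaces A's quadratic per-step scans (membership test + all-prefix scan) by a single
-- pass keeping a running maximum; objective: faster (O(n^2) → O(n)).

-- ===== PORT A =====
-- literal transliteration of A: for i in range(1, len(results)) with results[i] (always
-- in range, so .getD 0 is never the default) and the slice results[:i]
def filter_noise (results : List Int) : List Int :=
  match results with
  | [] => []
  | r0 :: _ =>
    (PySem.List.pyRange 1 (results.length : Int) 1).foldl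
      (fun filtered i =>
        let current := (PySem.List.pyGet? results i).getD 0
        let previous := PySem.List.slice results (some 0) (some i)
        if !(filtered.contains current) && previous.all (fun p => decide (p ≤ current))
        then filtered ++ [current] else filtered)
      [r0]

-- ===== PORT B =====
def filter_noise_alt (results : List Int) : List Int :=
  match results with
  | [] => []
  | r0 :: rest =>
    (rest.foldl (fun (st : List Int × Int) x =>
        if st.2 < x then (st.1 ++ [x], x) else st) ([r0], r0)).1

-- ===== PRECONDITION & SPEC =====
def Spec_filter_noise (results : List Int) (out : List Int) : Prop := out = filter_noise_alt results
instance (results : List Int) (out : List Int) : Decidable (Spec_filter_noise results out) := by unfold Spec_filter_noise; infer_instance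

-- ===== CLAIM (what is proved, stated in full; the proofs are below) =====
def Claim_equal_filter_noise : Prop := ∀ (results : List Int), Dom_filter_noise results → Spec_filter_noise results (filter_noise results)

-- ===== LEMMAS AND PROOFS =====

-- the strict prefix-records of xs, given running maximum m so far
def pvRecs (m : Int) (xs : List Int) : List Int :=
  match xs with
  | [] => []
  | x :: t => if m < x then x :: pvRecs x t else pvRecs m t

-- B's fold appends exactly the strict records
theorem pvB_fold (xs : List Int) : ∀ (acc : List Int) (m : Int),
    (xs.foldl (fun (st : List Int × Int) x =>
        if st.2 < x then (st.1 ++ [x], x) else st) (acc, m)).1 = acc ++ pvRecs m xs := by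
  induction xs with
  | nil => intro acc m; simp [pvRecs]
  | cons x t ih =>
    intro acc m
    by_cases h : m < x
    · simp [List.foldl_cons, h, pvRecs, ih]
    · simp [List.foldl_cons, h, pvRecs, ih]

-- A's loop, processed prefix `pre` with running max m (m ∈ pre, every element of pre ≤ m,
-- filtered ⊆ values ≤ m with m ∈ filtered), appends exactly the strict records of the suffix
theorem pvA_loop (suf : List Int) : ∀ (pre filtered : List Int) (m : Int),
    (∀ y ∈ pre, y ≤ m) → m ∈ pre → (∀ y ∈ filtered, y ≤ m) → m ∈ filtered →
    (PySem.List.pyRange (pre.length : Int) (((pre ++ suf).length : Nat) : Int) 1).foldl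
      (fun filtered i =>
        let current := (PySem.List.pyGet? (pre ++ suf) i).getD 0
        let previous := PySem.List.slice (pre ++ suf) (some 0) (some i)
        if !(filtered.contains current) && previous.all (fun p => decide (p ≤ current))
        then filtered ++ [current] else filtered)
      filtered = filtered ++ pvRecs m suf := by
  induction suf with
  | nil =>
    intro pre filtered m _ _ _ _
    rw [PySem.List.pyRange_one_eq_nil (by simp)]
    simp [pvRecs]
  | cons x t ih =>
    intro pre filtered m hpre hmpre hfilt hmfilt
    have hlt : (pre.length : Int) < ((pre ++ x :: t).length : Nat) := by
      simp
    rw [PySem.List.pyRange_one_cons hlt, List.foldl_cons]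
    have hcur : (PySem.List.pyGet? (pre ++ x :: t) (pre.length : Int)).getD 0 = x := by
      rw [PySem.List.pyGet?_append_length]; rfl
    have hprev : PySem.List.slice (pre ++ x :: t) (some 0) (some (pre.length : Int)) = pre := by
      rw [PySem.List.slice_zero_start, PySem.List.slice_to_natCast, List.take_left]
    -- rewrite the first step's body
    simp only [hcur, hprev]
    by_cases h : m < x
    · -- record: x ∉ filtered (all ≤ m < x) and every prev ≤ m < x
      have hnc : filtered.contains x = false := by
        simp only [List.contains_eq_mem, decide_eq_false_iff_not]
        intro hx; exact absurd (hfilt x hx) (by omega)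
      have hall : pre.all (fun p => decide (p ≤ x)) = true := by
        simp only [List.all_eq_true, decide_eq_true_eq]
        intro p hp; have := hpre p hp; omega
      simp only [hnc, hall, Bool.not_false, Bool.and_true, if_true]
      have hre : pre ++ x :: t = (pre ++ [x]) ++ t := by simp
      have := ih (pre ++ [x]) (filtered ++ [x]) x
        (by intro y hy; rcases List.mem_append.1 hy with h1 | h1
            · have := hpre y h1; omega
            · simp at h1; omega)
        (by simp) 
        (by intro y hy; rcases List.mem_append.1 hy with h1 | h1
            · have := hfilt y h1; omega
            · simp at h1; omega)
        (by simp)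
      rw [hre]
      have hlen : ((pre.length : Int) + 1) = ((pre ++ [x]).length : Int) := by simp
      rw [hlen]
      simpa [pvRecs, if_pos h] using this
    · -- no record: either x = m (x ∈ filtered) or x < m (m ∈ pre falsifies the all)
      have hcond : (!(filtered.contains x) && pre.all (fun p => decide (p ≤ x))) = false := by
        rcases eq_or_lt_of_le (by omega : x ≤ m) with heq | hlt2
        · have : filtered.contains x = true := by
            simp only [List.contains_eq_mem, decide_eq_true_eq]; rw [heq]; exact hmfilt
          simp only [this, Bool.not_true, Bool.false_and]
        · have : pre.all (fun p => decide (p ≤ x)) = false := by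
            simp only [List.all_eq_false]
            exact ⟨m, hmpre, by simp; omega⟩
          simp only [this, Bool.and_false]
      simp only [hcond, Bool.false_eq_true, if_false]
      have hre : pre ++ x :: t = (pre ++ [x]) ++ t := by simp
      have := ih (pre ++ [x]) filtered m
        (by intro y hy; rcases List.mem_append.1 hy with h1 | h1
            · exact hpre y h1
            · simp at h1; omega)
        (List.mem_append.2 (Or.inl hmpre)) hfilt hmfilt
      rw [hre]
      have hlen : ((pre.length : Int) + 1) = ((pre ++ [x]).length : Int) := by simp
      rw [hlen]
      simpa [pvRecs, if_neg h] using this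

-- ===== VERDICT (by name: the statement is the Claim_ definition above) =====
theorem filter_noise_spec : Claim_equal_filter_noise := by
  intro results _
  unfold Spec_filter_noise filter_noise filter_noise_alt
  match results with
  | [] => rfl
  | r0 :: rest =>
    have hA := pvA_loop rest [r0] [r0] r0 (by simp) (by simp) (by simp) (by simp)
    have : ([r0] : List Int) ++ rest = r0 :: rest := rfl
    rw [this] at hA
    norm_num at hA ⊢
    rw [hA, pvB_fold rest [r0] r0]
    rfl
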